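-- pv_equiv track=rewrite | github.com/CoderMayne/GravelDonkey.ai---Ultimate-One-Click-AI-Environment-and-Application-Installer | GravelDonkey.ai---Ultimate-One-Click-AI-Environment-and-Application-Installer/hardware_detector.py | _get_gpu_architecture
-- ===== SOURCE A (Python) =====
-- def _get_gpu_architecture(gpu_name):
--     """Determine GPU architecture from name for optimization recommendations."""
--     gpu_name_lower = gpu_name.lower()
--
--     # NVIDIA architectures
--     if any(x in gpu_name_lower for x in ['rtx 40', '4090', '4080', '4070', '4060']):
--         return "Ada Lovelace", "sm_89"
--     elif any(x in gpu_name_lower for x in ['rtx 30', '3090', '3080', '3070', '3060']):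
--         return "Ampere", "sm_86"
--     elif any(x in gpu_name_lower for x in ['rtx 20', '2080', '2070', '2060', 'titan rtx']):
--         return "Turing", "sm_75"
--     elif any(x in gpu_name_lower for x in ['gtx 16', '1660', '1650']):
--         return "Turing", "sm_75"
--     elif any(x in gpu_name_lower for x in ['gtx 10', '1080', '1070', '1060', '1050']):
--         return "Pascal", "sm_61"
--     elif any(x in gpu_name_lower for x in ['tesla v100']):
--         return "Volta", "sm_70"
--     elif any(x in gpu_name_lower for x in ['tesla p100']):
--         return "Pascal", "sm_60"
--     elif any(x in gpu_name_lower for x in ['tesla k80', 'tesla k40']):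
--         return "Kepler", "sm_37"
--     elif any(x in gpu_name_lower for x in ['h100', 'a100']):
--         return "Hopper/Ampere", "sm_90"
--
--     # AMD architectures
--     elif any(x in gpu_name_lower for x in ['rx 9070', '9070 xt']):
--         return "RDNA 4", "gfx1200"
--     elif any(x in gpu_name_lower for x in ['rx 7900', 'rx 7800', 'rx 7700', 'rx 7600']):
--         return "RDNA 3", "gfx1100"
--     elif any(x in gpu_name_lower for x in ['rx 6950', 'rx 6900', 'rx 6800', 'rx 6700', 'rx 6600', 'rx 6500']):
--         return "RDNA 2", "gfx1030"
--     elif any(x in gpu_name_lower for x in ['rx 5700', 'rx 5600', 'rx 5500']):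
--         return "RDNA", "gfx1010"
--     elif any(x in gpu_name_lower for x in ['vega 64', 'vega 56', 'radeon vii']):
--         return "GCN 5.0", "gfx900"
--
--     # Intel architectures
--     elif any(x in gpu_name_lower for x in ['arc a770', 'arc a750', 'arc a580']):
--         return "Xe-HPG", "DG2"
--     elif any(x in gpu_name_lower for x in ['arc a380', 'arc a310']):
--         return "Xe-HPG", "DG2"
--     elif 'iris xe' in gpu_name_lower:
--         return "Xe-LP", "Gen12"
--
--     return "Unknown", "unknown"
-- ===== SOURCE B (Python) =====
-- _GROUPS = [
--     (['rtx 40', '4090', '4080', '4070', '4060'], ("Ada Lovelace", "sm_89")),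
--     (['rtx 30', '3090', '3080', '3070', '3060'], ("Ampere", "sm_86")),
--     (['rtx 20', '2080', '2070', '2060', 'titan rtx'], ("Turing", "sm_75")),
--     (['gtx 16', '1660', '1650'], ("Turing", "sm_75")),
--     (['gtx 10', '1080', '1070', '1060', '1050'], ("Pascal", "sm_61")),
--     (['tesla v100'], ("Volta", "sm_70")),
--     (['tesla p100'], ("Pascal", "sm_60")),
--     (['tesla k80', 'tesla k40'], ("Kepler", "sm_37")),
--     (['h100', 'a100'], ("Hopper/Ampere", "sm_90")),
--     (['rx 9070', '9070 xt'], ("RDNA 4", "gfx1200")),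
--     (['rx 7900', 'rx 7800', 'rx 7700', 'rx 7600'], ("RDNA 3", "gfx1100")),
--     (['rx 6950', 'rx 6900', 'rx 6800', 'rx 6700', 'rx 6600', 'rx 6500'], ("RDNA 2", "gfx1030")),
--     (['rx 5700', 'rx 5600', 'rx 5500'], ("RDNA", "gfx1010")),
--     (['vega 64', 'vega 56', 'radeon vii'], ("GCN 5.0", "gfx900")),
--     (['arc a770', 'arc a750', 'arc a580'], ("Xe-HPG", "DG2")),
--     (['arc a380', 'arc a310'], ("Xe-HPG", "DG2")),
--     (['iris xe'], ("Xe-LP", "Gen12")),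
-- ]
--
-- # keyword -> (priority, result); keywords are unique across groups, so a hit's
-- # priority identifies its rule and the smallest priority seen wins.
-- _KEYWORDS = {}
-- for _p, (_subs, _res) in enumerate(_GROUPS):
--     for _k in _subs:
--         _KEYWORDS[_k] = (_p, _res)
-- _LENGTHS = sorted({len(_k) for _k in _KEYWORDS})
--
--
-- def _get_gpu_architecture(gpu_name):
--     """Single left-to-right scan of the name: hash every slice (of a keyword
--     length) into the keyword table and keep the hit of smallest priority."""
--     name = gpu_name.lower()
--     n = len(name)
--     best = None
--     for i in range(n):
--         for L in _LENGTHS: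
--             if i + L <= n:
--                 hit = _KEYWORDS.get(name[i:i + L])
--                 if hit is not None and (best is None or hit[0] < best[0]):
--                     best = hit
--     return best[1] if best is not None else ("Unknown", "unknown")
-- ===== Notes on version B (the rewrite author's own statement) =====
-- stated objective: alternative
-- what changed: Replaces A's 17 per-rule substring-membership passes over the name with a single left-to-right scan that hashes each slice of a keyword length into a precomputed keyword-to-(priority,result) dictionary and keeps the hit of smallest priority (earliest rule).
import Mathlib
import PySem

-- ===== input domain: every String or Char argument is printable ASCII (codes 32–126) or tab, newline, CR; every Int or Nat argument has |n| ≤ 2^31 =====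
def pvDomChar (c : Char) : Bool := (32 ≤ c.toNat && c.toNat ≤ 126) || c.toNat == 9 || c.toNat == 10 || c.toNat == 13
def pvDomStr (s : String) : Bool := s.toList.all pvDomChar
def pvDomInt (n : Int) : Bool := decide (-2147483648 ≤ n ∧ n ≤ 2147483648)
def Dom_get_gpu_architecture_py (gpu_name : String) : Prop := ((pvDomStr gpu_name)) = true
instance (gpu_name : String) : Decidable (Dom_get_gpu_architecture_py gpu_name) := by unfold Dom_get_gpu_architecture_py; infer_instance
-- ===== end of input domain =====

-- B replaces A's rule-by-rule substring-membership passes by a single left-to-right scan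
-- of the name: each slice of a keyword length is looked up in a keyword -> (priority, result)
-- dictionary and the hit of smallest priority (= earliest rule) wins (alternative; same order of cost).

-- ===== PORT A =====
def get_gpu_architecture_py (gpu_name : String) : String × String :=
  let gpu_name_lower := PySem.Str.lower gpu_name
  if ((["rtx 40", "4090", "4080", "4070", "4060"] : List String).any (fun x => PySem.Str.isIn x gpu_name_lower)) then
    ("Ada Lovelace", "sm_89")
  else if ((["rtx 30", "3090", "3080", "3070", "3060"] : List String).any (fun x => PySem.Str.isIn x gpu_name_lower)) then
    ("Ampere", "sm_86")
  else if ((["rtx 20", "2080", "2070", "2060", "titan rtx"] : List String).any (fun x => PySem.Str.isIn x gpu_name_lower)) then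
    ("Turing", "sm_75")
  else if ((["gtx 16", "1660", "1650"] : List String).any (fun x => PySem.Str.isIn x gpu_name_lower)) then
    ("Turing", "sm_75")
  else if ((["gtx 10", "1080", "1070", "1060", "1050"] : List String).any (fun x => PySem.Str.isIn x gpu_name_lower)) then
    ("Pascal", "sm_61")
  else if ((["tesla v100"] : List String).any (fun x => PySem.Str.isIn x gpu_name_lower)) then
    ("Volta", "sm_70")
  else if ((["tesla p100"] : List String).any (fun x => PySem.Str.isIn x gpu_name_lower)) then
    ("Pascal", "sm_60")
  else if ((["tesla k80", "tesla k40"] : List String).any (fun x => PySem.Str.isIn x gpu_name_lower)) then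
    ("Kepler", "sm_37")
  else if ((["h100", "a100"] : List String).any (fun x => PySem.Str.isIn x gpu_name_lower)) then
    ("Hopper/Ampere", "sm_90")
  else if ((["rx 9070", "9070 xt"] : List String).any (fun x => PySem.Str.isIn x gpu_name_lower)) then
    ("RDNA 4", "gfx1200")
  else if ((["rx 7900", "rx 7800", "rx 7700", "rx 7600"] : List String).any (fun x => PySem.Str.isIn x gpu_name_lower)) then
    ("RDNA 3", "gfx1100")
  else if ((["rx 6950", "rx 6900", "rx 6800", "rx 6700", "rx 6600", "rx 6500"] : List String).any (fun x => PySem.Str.isIn x gpu_name_lower)) then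
    ("RDNA 2", "gfx1030")
  else if ((["rx 5700", "rx 5600", "rx 5500"] : List String).any (fun x => PySem.Str.isIn x gpu_name_lower)) then
    ("RDNA", "gfx1010")
  else if ((["vega 64", "vega 56", "radeon vii"] : List String).any (fun x => PySem.Str.isIn x gpu_name_lower)) then
    ("GCN 5.0", "gfx900")
  else if ((["arc a770", "arc a750", "arc a580"] : List String).any (fun x => PySem.Str.isIn x gpu_name_lower)) then
    ("Xe-HPG", "DG2")
  else if ((["arc a380", "arc a310"] : List String).any (fun x => PySem.Str.isIn x gpu_name_lower)) then
    ("Xe-HPG", "DG2")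
  else if ((["iris xe"] : List String).any (fun x => PySem.Str.isIn x gpu_name_lower)) then
    ("Xe-LP", "Gen12")
  else
    ("Unknown", "unknown")

-- ===== PORT B =====
def gpuGroups : List (List (List Char) × (String × String)) :=
  [
    (["rtx 40".toList, "4090".toList, "4080".toList, "4070".toList, "4060".toList], ("Ada Lovelace", "sm_89")),
    (["rtx 30".toList, "3090".toList, "3080".toList, "3070".toList, "3060".toList], ("Ampere", "sm_86")),
    (["rtx 20".toList, "2080".toList, "2070".toList, "2060".toList, "titan rtx".toList], ("Turing", "sm_75")),
    (["gtx 16".toList, "1660".toList, "1650".toList], ("Turing", "sm_75")),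
    (["gtx 10".toList, "1080".toList, "1070".toList, "1060".toList, "1050".toList], ("Pascal", "sm_61")),
    (["tesla v100".toList], ("Volta", "sm_70")),
    (["tesla p100".toList], ("Pascal", "sm_60")),
    (["tesla k80".toList, "tesla k40".toList], ("Kepler", "sm_37")),
    (["h100".toList, "a100".toList], ("Hopper/Ampere", "sm_90")),
    (["rx 9070".toList, "9070 xt".toList], ("RDNA 4", "gfx1200")),
    (["rx 7900".toList, "rx 7800".toList, "rx 7700".toList, "rx 7600".toList], ("RDNA 3", "gfx1100")),
    (["rx 6950".toList, "rx 6900".toList, "rx 6800".toList, "rx 6700".toList, "rx 6600".toList, "rx 6500".toList], ("RDNA 2", "gfx1030")),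
    (["rx 5700".toList, "rx 5600".toList, "rx 5500".toList], ("RDNA", "gfx1010")),
    (["vega 64".toList, "vega 56".toList, "radeon vii".toList], ("GCN 5.0", "gfx900")),
    (["arc a770".toList, "arc a750".toList, "arc a580".toList], ("Xe-HPG", "DG2")),
    (["arc a380".toList, "arc a310".toList], ("Xe-HPG", "DG2")),
    (["iris xe".toList], ("Xe-LP", "Gen12")) ]


-- _KEYWORDS: keyword -> (priority, result), built by the module-level enumerate loop of Source B
def gpuKw : PySem.Dict (List Char) (Int × (String × String)) :=
  (PySem.List.enumerate gpuGroups).foldl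
    (fun d pg => pg.2.1.foldl (fun d k => d.insert k (pg.1, pg.2.2)) d)
    PySem.Dict.empty

-- _LENGTHS = sorted({len(k) for k in _KEYWORDS})
def gpuLengths : List Nat :=
  PySem.List.sorted (PySem.Set.ofList (gpuKw.keys.map List.length)) (fun x => x) false

def get_gpu_architecture_py_alt (gpu_name : String) : String × String :=
  let N := (PySem.Str.lower gpu_name).toList
  let n := N.length
  let best := (List.range n).foldl
    (fun best i => gpuLengths.foldl
      (fun b L =>
        if i + L ≤ n then
          match gpuKw.get? (PySem.List.slice N (some (i : Int)) (some ((i : Int) + (L : Int)))) with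
          | some hit =>
              let keep : Bool := match b with | none => true | some bb => decide (hit.1 < bb.1)
              if keep then some hit else b
          | none => b
        else b) best) none
  match best with
  | some hit => hit.2
  | none => ("Unknown", "unknown")

-- ===== PRECONDITION & SPEC =====
def Spec_get_gpu_architecture_py (gpu_name : String) (out : String × String) : Prop := out = get_gpu_architecture_py_alt gpu_name
instance (gpu_name : String) (out : String × String) : Decidable (Spec_get_gpu_architecture_py gpu_name out) := by unfold Spec_get_gpu_architecture_py; infer_instance

-- ===== CLAIM (what is proved, stated in full; the proofs are below) =====
def Claim_equal_get_gpu_architecture_py : Prop := ∀ (gpu_name : String), Dom_get_gpu_architecture_py gpu_name → Spec_get_gpu_architecture_py gpu_name (get_gpu_architecture_py gpu_name)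

-- ===== LEMMAS AND PROOFS =====
-- ---- proof-side machinery ----
set_option maxRecDepth 4096

-- the accumulator update of B's inner loop, as a standalone function
def pvStep (b : Option (Int × (String × String))) (h : Int × (String × String)) :
    Option (Int × (String × String)) :=
  let keep : Bool := match b with | none => true | some bb => decide (h.1 < bb.1)
  if keep then some h else b

-- the hits produced at position i, and over the whole scan
def pvHitAt (N : List Char) (i : Nat) : List (Int × (String × String)) :=
  gpuLengths.filterMap (fun L =>
    if i + L ≤ N.length then
      gpuKw.get? (PySem.List.slice N (some (i : Int)) (some ((i : Int) + (L : Int))))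
    else none)

def pvHits (N : List Char) : List (Int × (String × String)) :=
  (List.range N.length).flatMap (pvHitAt N)

-- the rule table read back per index (for relating the dict to A's branch conditions)
def pvSubsL (q : Nat) : List (List Char) := (gpuGroups.getD q ([], ("", ""))).1
def pvResP (q : Nat) : String × String := (gpuGroups.getD q ([], ("", ""))).2
def pvCondL (N : List Char) (q : Nat) : Bool := (pvSubsL q).any (fun k => PySem.Chars.isIn k N)

-- B's inner fold is the pvStep-fold of the looked-up hits
lemma pvInnerEq (N : List Char) (i : Nat) : ∀ (lens : List Nat) (b : Option (Int × (String × String))),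
    lens.foldl (fun b L =>
        if i + L ≤ N.length then
          match gpuKw.get? (PySem.List.slice N (some (i : Int)) (some ((i : Int) + (L : Int)))) with
          | some hit =>
              let keep : Bool := match b with | none => true | some bb => decide (hit.1 < bb.1)
              if keep then some hit else b
          | none => b
        else b) b
      = (lens.filterMap (fun L =>
          if i + L ≤ N.length then
            gpuKw.get? (PySem.List.slice N (some (i : Int)) (some ((i : Int) + (L : Int))))
          else none)).foldl pvStep b := by
  intro lens
  induction lens with
  | nil => intro b; rfl
  | cons L t ih =>
      intro b
      simp only [List.foldl_cons, List.filterMap_cons]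
      by_cases hL : i + L ≤ N.length
      · simp only [hL, if_true]
        cases hg : gpuKw.get? (PySem.List.slice N (some (i : Int)) (some ((i : Int) + (L : Int)))) with
        | none => rw [ih]
        | some hit =>
            rw [ih]
            rfl
      · simp only [hL, if_false]
        rw [ih]

-- B's outer fold is the pvStep-fold of all hits
lemma pvOuterEq (N : List Char) : ∀ (is : List Nat) (b : Option (Int × (String × String))),
    is.foldl (fun best i => gpuLengths.foldl (fun b L =>
        if i + L ≤ N.length then
          match gpuKw.get? (PySem.List.slice N (some (i : Int)) (some ((i : Int) + (L : Int)))) with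
          | some hit =>
              let keep : Bool := match b with | none => true | some bb => decide (hit.1 < bb.1)
              if keep then some hit else b
          | none => b
        else b) best) b
      = (is.flatMap (pvHitAt N)).foldl pvStep b := by
  intro is
  induction is with
  | nil => intro b; rfl
  | cons i t ih =>
      intro b
      simp only [List.foldl_cons, List.flatMap_cons, List.foldl_append]
      rw [pvInnerEq, ih]
      rfl

-- B's result, through the hit list
lemma pvAltEq (name : String) :
    get_gpu_architecture_py_alt name
      = (match (pvHits ((PySem.Str.lower name).toList)).foldl pvStep none with
         | some hit => hit.2
         | none => ("Unknown", "unknown")) := by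
  simp only [get_gpu_architecture_py_alt]
  rw [pvOuterEq]
  rfl

-- the pvStep-fold from a some-start returns a minimal element
lemma pvFoldSome (hs : List (Int × (String × String))) :
    ∀ (b : Int × (String × String)), ∃ c, hs.foldl pvStep (some b) = some c ∧
      (c = b ∨ c ∈ hs) ∧ c.1 ≤ b.1 ∧ ∀ h ∈ hs, c.1 ≤ h.1 := by
  induction hs with
  | nil => intro b; exact ⟨b, rfl, Or.inl rfl, le_refl _, by simp⟩
  | cons h t ih =>
      intro b
      by_cases hlt : h.1 < b.1
      · obtain ⟨c, hc, hmem, hle, hmin⟩ := ih h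
        refine ⟨c, ?_, ?_, ?_, ?_⟩
        · simpa [pvStep, hlt] using hc
        · rcases hmem with rfl | hm
          · exact Or.inr (List.mem_cons_self)
          · exact Or.inr (List.mem_cons_of_mem _ hm)
        · omega
        · intro x hx
          rcases List.mem_cons.mp hx with rfl | hm
          · exact hle
          · exact hmin x hm
      · obtain ⟨c, hc, hmem, hle, hmin⟩ := ih b
        refine ⟨c, ?_, ?_, hle, ?_⟩
        · simpa [pvStep, hlt] using hc
        · rcases hmem with rfl | hm
          · exact Or.inl rfl
          · exact Or.inr (List.mem_cons_of_mem _ hm)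
        · intro x hx
          rcases List.mem_cons.mp hx with rfl | hm
          · omega
          · exact hmin x hm

lemma pvFoldNone (hs : List (Int × (String × String))) (hne : hs ≠ []) :
    ∃ c, hs.foldl pvStep none = some c ∧ c ∈ hs ∧ ∀ h ∈ hs, c.1 ≤ h.1 := by
  cases hs with
  | nil => exact absurd rfl hne
  | cons h t =>
      obtain ⟨c, hc, hmem, hle, hmin⟩ := pvFoldSome t h
      refine ⟨c, ?_, ?_, ?_⟩
      · simpa [pvStep] using hc
      · rcases hmem with rfl | hm
        · exact List.mem_cons_self
        · exact List.mem_cons_of_mem _ hm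
      · intro x hx
        rcases List.mem_cons.mp hx with rfl | hm
        · exact hle
        · exact hmin x hm

-- builtin facts about the literal keyword dictionary (all by computation)
lemma pvKwShape : ∀ p ∈ gpuKw.items, p.1.length ∈ gpuLengths ∧ p.1 ≠ [] := by decide
lemma pvKwUnique : ∀ a ∈ gpuKw.items, ∀ b ∈ gpuKw.items, a.2.1 = b.2.1 → a.2.2 = b.2.2 := by decide

-- what the hit list contains: exactly the dict values of the keywords occurring in N
lemma pvMemHits (N : List Char) (h : Int × (String × String)) :
    h ∈ pvHits N ↔ ∃ k, gpuKw.get? k = some h ∧ PySem.Chars.isIn k N = true := by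
  constructor
  · intro hm
    obtain ⟨i, hi, hin⟩ := List.mem_flatMap.mp hm
    obtain ⟨L, hL, hsel⟩ := List.mem_filterMap.mp hin
    by_cases hb : i + L ≤ N.length
    · simp only [hb, if_true] at hsel
      rw [PySem.List.slice_natCast_add] at hsel
      refine ⟨(N.drop i).take L, hsel, ?_⟩
      exact (PySem.Chars.exists_prefix_drop_iff_isIn _ _).mp ⟨i, List.take_prefix _ _⟩
    · simp [hb] at hsel
  · rintro ⟨k, hget, hIn⟩
    obtain ⟨j, hpre⟩ := (PySem.Chars.exists_prefix_drop_iff_isIn _ _).mpr hIn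
    have hitem := PySem.Dict.mem_items_of_get?_eq_some _ hget
    obtain ⟨hlen, hne⟩ := pvKwShape _ hitem
    have hkpos : 0 < k.length := List.length_pos_of_ne_nil hne
    have hle : j + k.length ≤ N.length := by
      have := hpre.length_le
      rw [List.length_drop] at this
      omega
    have hjlt : j < N.length := by omega
    refine List.mem_flatMap.mpr ⟨j, List.mem_range.mpr hjlt, ?_⟩
    refine List.mem_filterMap.mpr ⟨k.length, hlen, ?_⟩
    rw [if_pos hle, PySem.List.slice_natCast_add]
    have htake : (N.drop j).take k.length = k := (List.prefix_iff_eq_take.mp hpre).symm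
    rw [htake]; exact hget

-- every dict entry points back into its rule's keyword group
lemma pvKey (k : List Char) (h : Int × (String × String)) (hget : gpuKw.get? k = some h) :
    0 ≤ h.1 ∧ h.1.toNat < 17 ∧ k ∈ pvSubsL h.1.toNat := by
  have hm := PySem.Dict.mem_items_of_get?_eq_some _ hget
  fin_cases hm <;> exact ⟨by decide, by decide, by decide⟩

-- every keyword of rule q is in the dict with value (q, result of q)
lemma pvExist : ∀ q < 17, ∀ k ∈ pvSubsL q, gpuKw.get? k = some ((q : Int), pvResP q) := by decide

-- the scan fold returns the minimal-priority matching rule's entry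
lemma pvFoldHits (N : List Char) (p : Int) (res : String × String)
    (hex : ∃ k, gpuKw.get? k = some (p, res) ∧ PySem.Chars.isIn k N = true)
    (hmin : ∀ k h, gpuKw.get? k = some h → PySem.Chars.isIn k N = true → p ≤ h.1) :
    (pvHits N).foldl pvStep none = some (p, res) := by
  have hmem : (p, res) ∈ pvHits N := (pvMemHits N _).mpr hex
  have hne : pvHits N ≠ [] := List.ne_nil_of_mem hmem
  obtain ⟨c, hc, hcm, hcmin⟩ := pvFoldNone _ hne
  obtain ⟨k', hget', hIn'⟩ := (pvMemHits N c).mp hcm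
  have h1 : p ≤ c.1 := hmin k' c hget' hIn'
  have h2 : c.1 ≤ p := hcmin _ hmem
  have hpc : c.1 = p := le_antisymm h2 h1
  obtain ⟨k0, hget0, _⟩ := hex
  have hi0 := PySem.Dict.mem_items_of_get?_eq_some _ hget0
  have hi' := PySem.Dict.mem_items_of_get?_eq_some _ hget'
  have := pvKwUnique _ hi' _ hi0 (by simpa using hpc)
  rw [hc]
  have : c = (p, res) := by
    cases c
    simp_all
  rw [this]

-- no keyword occurs: the scan finds nothing
lemma pvFoldHitsNone (N : List Char)
    (hnone : ∀ k h, gpuKw.get? k = some h → PySem.Chars.isIn k N = true → False) :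
    (pvHits N).foldl pvStep none = none := by
  have : pvHits N = [] := by
    rcases List.eq_nil_or_concat (pvHits N) with h | ⟨ys, y, hy⟩
    · exact h
    · exfalso
      have : y ∈ pvHits N := by rw [hy]; simp
      obtain ⟨k, hget, hIn⟩ := (pvMemHits N y).mp this
      exact hnone k y hget hIn
  rw [this]
  rfl

-- B's value when rule p is the first whose keyword group matches
lemma pvAltBranch (name : String) (p : Nat) (hp : p < 17)
    (ht : pvCondL ((PySem.Str.lower name).toList) p = true)
    (hf : ∀ q < p, pvCondL ((PySem.Str.lower name).toList) q = false) :
    get_gpu_architecture_py_alt name = pvResP p := by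
  rw [pvAltEq]
  obtain ⟨k, hk, hIn⟩ := List.any_eq_true.mp ht
  rw [pvFoldHits _ (p : Int) (pvResP p) ⟨k, pvExist p hp k hk, hIn⟩ ?_]
  · intro k' h hget hIn'
    obtain ⟨h0, h17, hmem⟩ := pvKey k' h hget
    by_contra hcon
    rw [Int.not_le] at hcon
    have hq : h.1.toNat < p := by omega
    have : pvCondL ((PySem.Str.lower name).toList) h.1.toNat = true :=
      List.any_eq_true.mpr ⟨k', hmem, hIn'⟩
    rw [hf _ hq] at this
    exact Bool.false_ne_true this

-- B's value when no rule matches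
lemma pvAltNone (name : String)
    (hf : ∀ q < 17, pvCondL ((PySem.Str.lower name).toList) q = false) :
    get_gpu_architecture_py_alt name = ("Unknown", "unknown") := by
  rw [pvAltEq]
  rw [pvFoldHitsNone]
  intro k h hget hIn
  obtain ⟨h0, h17, hmem⟩ := pvKey k h hget
  have : pvCondL ((PySem.Str.lower name).toList) h.1.toNat = true :=
    List.any_eq_true.mpr ⟨k, hmem, hIn⟩
  rw [hf _ h17] at this
  exact Bool.false_ne_true this

-- A's if/elif chain, as first-match recursion over a rule list
def pvChainG (N : List Char) : List (List (List Char) × (String × String)) → String × String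
  | [] => ("Unknown", "unknown")
  | (subs, res) :: rest =>
      if subs.any (fun k => PySem.Chars.isIn k N) then res else pvChainG N rest

lemma pvDropQ : ∀ q < 17, gpuGroups.drop q = (pvSubsL q, pvResP q) :: gpuGroups.drop (q + 1) := by decide

-- B computes the tail of the chain once the first q rules are known not to match
lemma pvChainAux (name : String) : ∀ (k q : Nat), q + k = 17 →
    (∀ r < q, pvCondL ((PySem.Str.lower name).toList) r = false) →
    get_gpu_architecture_py_alt name = pvChainG ((PySem.Str.lower name).toList) (gpuGroups.drop q) := by
  intro k
  induction k with
  | zero =>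
      intro q hq hacc
      have hq17 : q = 17 := by omega
      subst hq17
      rw [show gpuGroups.drop 17 = [] from rfl]
      exact pvAltNone name hacc
  | succ k ih =>
      intro q hq hacc
      rw [pvDropQ q (by omega)]
      show get_gpu_architecture_py_alt name
        = if pvCondL ((PySem.Str.lower name).toList) q = true then pvResP q
          else pvChainG ((PySem.Str.lower name).toList) (gpuGroups.drop (q + 1))
      cases hcond : pvCondL ((PySem.Str.lower name).toList) q with
      | true =>
          rw [if_pos rfl]
          exact pvAltBranch name q (by omega) hcond hacc
      | false =>
          rw [if_neg Bool.false_ne_true]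
          refine ih (q + 1) (by omega) ?_
          intro r hr
          by_cases hrq : r = q
          · rw [hrq]; exact hcond
          · exact hacc r (by omega)

set_option maxHeartbeats 1000000 in
lemma pvMainEq (name : String) : get_gpu_architecture_py name = get_gpu_architecture_py_alt name := by
  have hA : get_gpu_architecture_py name
      = pvChainG ((PySem.Str.lower name).toList) gpuGroups := rfl
  rw [hA, pvChainAux name 17 0 rfl (fun r hr => absurd hr (Nat.not_lt_zero r))]
  rfl

-- ===== VERDICT (by name: the statement is the Claim_ definition above) =====
theorem get_gpu_architecture_py_spec : Claim_equal_get_gpu_architecture_py := by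
  intro name _
  unfold Spec_get_gpu_architecture_py
  exact pvMainEq name
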